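-- pv_equiv track=rewrite | github.com/benwatson528/advent-of-code-24 | main/day22/monkey_market.py | find_secret_trade
-- ===== SOURCE A (Python) =====
-- def find_secret_trade(secret, num_secrets):
--     diffs = []
--     secret_diffs = {}
--     for i in range(num_secrets):
--         last_secret = int(str(secret)[-1])
--         secret = transform_secret(secret)
--         score = int(str(secret)[-1])
--         diffs.append(score - last_secret)
--         last_four = tuple(diffs[-4:])
--         if i >= 3 and last_four not in secret_diffs:
--             secret_diffs[last_four] = score
--     return secret_diffs
--
-- def transform_secret(secret):
--     secret = ((secret * 64) ^ secret) % 16777216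
--     secret = ((secret // 32) ^ secret) % 16777216
--     return ((secret * 2048) ^ secret) % 16777216
-- ===== SOURCE B (Python) =====
-- def transform_secret(secret):
--     secret = ((secret * 64) ^ secret) % 16777216
--     secret = ((secret // 32) ^ secret) % 16777216
--     return ((secret * 2048) ^ secret) % 16777216
--
--
-- def find_secret_trade(secret, num_secrets):
--     # pass 1: generate the whole price (ones-digit) sequence
--     prices = [int(str(secret)[-1])]
--     for _ in range(num_secrets):
--         secret = transform_secret(secret)
--         prices.append(int(str(secret)[-1]))
--     # pass 2: consecutive differences
--     diffs = [prices[i + 1] - prices[i] for i in range(len(prices) - 1)]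
--     # pass 3: first occurrence of each 4-diff window -> sell price
--     secret_diffs = {}
--     for i in range(3, len(diffs)):
--         window = tuple(diffs[i - 3:i + 1])
--         if window not in secret_diffs:
--             secret_diffs[window] = prices[i + 1]
--     return secret_diffs
-- ===== Notes on version B (the rewrite author's own statement) =====
-- stated objective: alternative
-- what changed: A interleaves secret generation, diff tracking and dict insertion in one stateful loop slicing diffs[-4:] each iteration; B is three separate passes: build the full price (ones-digit) list, derive the consecutive-difference list, then scan windows diffs[i-3:i+1] recording first occurrences.
import Mathlib
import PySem

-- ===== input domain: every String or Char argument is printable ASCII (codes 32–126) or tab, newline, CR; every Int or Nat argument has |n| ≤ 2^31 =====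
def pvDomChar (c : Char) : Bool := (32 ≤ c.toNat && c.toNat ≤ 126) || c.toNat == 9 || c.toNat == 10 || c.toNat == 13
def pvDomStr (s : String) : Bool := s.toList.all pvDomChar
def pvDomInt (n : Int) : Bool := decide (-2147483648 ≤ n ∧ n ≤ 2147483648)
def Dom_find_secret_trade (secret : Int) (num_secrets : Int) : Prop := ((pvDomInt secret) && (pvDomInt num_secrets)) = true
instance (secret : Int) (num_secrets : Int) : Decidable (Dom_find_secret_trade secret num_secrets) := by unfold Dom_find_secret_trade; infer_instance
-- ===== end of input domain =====

-- B separates A's single stateful loop into three passes (price list, diff list, window scan); objective: alternative decomposition, same asymptotic cost.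


-- ===== PORT A =====
-- transform_secret, a same-module helper both Pythons call verbatim
def transform_secret (secret : Int) : Int :=
  let s1 := PySem.Int.mod (PySem.Int.bxor (secret * 64) secret) 16777216
  let s2 := PySem.Int.mod (PySem.Int.bxor (PySem.Int.floordiv s1 32) s1) 16777216
  PySem.Int.mod (PySem.Int.bxor (s2 * 2048) s2) 16777216

-- int(str(n)[-1]); str(n) is nonempty and ends in a digit, so neither lookup
-- nor int() can fail — the .getD defaults are unreachable
def onesDigit (n : Int) : Int :=
  match PySem.Str.pyGet? (PySem.Int.toStr n) (-1) with
  | some c => (PySem.Int.ofStr? (String.ofList [c])).getD 0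
  | none => 0

def find_secret_trade (secret : Int) (num_secrets : Int) : List (List Int × Int) :=
  let st := (PySem.List.pyRange 0 num_secrets 1).foldl
    (fun (st : Int × List Int × PySem.Dict (List Int) Int) i =>
      let sec := st.1
      let diffs := st.2.1
      let sd := st.2.2
      let last_secret := onesDigit sec
      let sec' := transform_secret sec
      let score := onesDigit sec'
      let diffs' := diffs ++ [score - last_secret]
      let last_four := PySem.List.slice diffs' (some (-4)) none
      let sd' := if 3 ≤ i ∧ sd.contains last_four = false then sd.insert last_four score else sd
      (sec', diffs', sd'))
    (secret, ([], PySem.Dict.empty))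
  st.2.2.items

-- ===== PORT B =====
def find_secret_trade_alt (secret : Int) (num_secrets : Int) : List (List Int × Int) :=
  let pr := (PySem.List.pyRange 0 num_secrets 1).foldl
    (fun (st : Int × List Int) _ =>
      let sec' := transform_secret st.1
      (sec', st.2 ++ [onesDigit sec']))
    (secret, [onesDigit secret])
  let prices := pr.2
  let diffs := (PySem.List.pyRange 0 ((prices.length : Int) - 1) 1).map
    (fun i => PySem.List.pyGetD prices (i + 1) 0 - PySem.List.pyGetD prices i 0)
  let sd := (PySem.List.pyRange 3 (diffs.length : Int) 1).foldl
    (fun (sd : PySem.Dict (List Int) Int) i =>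
      let window := PySem.List.slice diffs (some (i - 3)) (some (i + 1))
      if sd.contains window = false then sd.insert window (PySem.List.pyGetD prices (i + 1) 0) else sd)
    PySem.Dict.empty
  sd.items

-- ===== PRECONDITION & SPEC =====
def Spec_find_secret_trade (secret : Int) (num_secrets : Int) (out : List (List Int × Int)) : Prop := out = find_secret_trade_alt secret num_secrets
instance (secret : Int) (num_secrets : Int) (out : List (List Int × Int)) : Decidable (Spec_find_secret_trade secret num_secrets out) := by unfold Spec_find_secret_trade; infer_instance

-- ===== CLAIM (what is proved, stated in full; the proofs are below) =====
def Claim_equal_find_secret_trade : Prop := ∀ (secret : Int) (num_secrets : Int), Dom_find_secret_trade secret num_secrets → Spec_find_secret_trade secret num_secrets (find_secret_trade secret num_secrets)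

-- ===== LEMMAS AND PROOFS =====

-- secret after k transforms
def secAt (s : Int) (k : Nat) : Int := transform_secret^[k] s
-- j-th price difference
def dAt (s : Int) (j : Nat) : Int := onesDigit (secAt s (j + 1)) - onesDigit (secAt s j)
-- the diff list after k iterations
def diffsL (s : Int) (k : Nat) : List Int := (List.range k).map (dAt s)
-- the price list after n iterations
def pricesL (s : Int) (n : Nat) : List Int := (List.range (n + 1)).map (fun j => onesDigit (secAt s j))
-- the 4-diff window ending at index k
def winW (s : Int) (k : Nat) : List Int := [dAt s (k - 3), dAt s (k - 2), dAt s (k - 1), dAt s k]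
-- the dictionary after k iterations
def dictL (s : Int) : Nat → PySem.Dict (List Int) Int
  | 0 => PySem.Dict.empty
  | k + 1 =>
    let d := dictL s k
    if 3 ≤ k ∧ d.contains (winW s k) = false then d.insert (winW s k) (onesDigit (secAt s (k + 1))) else d

lemma window_drop {α : Type} (f : Nat → α) (N m : Nat) (h3 : 3 ≤ m) (hm : m < N) :
    ((((List.range N).map f).drop (m - 3)).take 4) = [f (m - 3), f (m - 2), f (m - 1), f m] := by
  apply List.ext_getElem
  · simp; omega
  · intro i hi1 hi2
    simp only [List.getElem_take, List.getElem_drop, List.getElem_map, List.getElem_range]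
    simp at hi2
    interval_cases i <;> simp <;> congr 1 <;> omega

lemma window_drop_full {α : Type} (f : Nat → α) (k : Nat) (h3 : 3 ≤ k) :
    (((List.range (k + 1)).map f).drop (k - 3)) = [f (k - 3), f (k - 2), f (k - 1), f k] := by
  apply List.ext_getElem
  · simp; omega
  · intro i hi1 hi2
    simp only [List.getElem_drop, List.getElem_map, List.getElem_range]
    simp at hi2
    interval_cases i <;> simp <;> congr 1 <;> omega

lemma foldA_eq (s : Int) (n : Nat) :
    (PySem.List.pyRange 0 (n : Int) 1).foldl
      (fun (st : Int × List Int × PySem.Dict (List Int) Int) i =>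
        let sec := st.1
        let diffs := st.2.1
        let sd := st.2.2
        let last_secret := onesDigit sec
        let sec' := transform_secret sec
        let score := onesDigit sec'
        let diffs' := diffs ++ [score - last_secret]
        let last_four := PySem.List.slice diffs' (some (-4)) none
        let sd' := if 3 ≤ i ∧ sd.contains last_four = false then sd.insert last_four score else sd
        (sec', diffs', sd'))
      (s, ([], PySem.Dict.empty))
    = (secAt s n, diffsL s n, dictL s n) := by
  induction n with
  | zero =>
    simp [PySem.List.pyRange_one_eq_nil (le_refl (0 : Int)), secAt, diffsL, dictL]
  | succ n ih =>
    have h0 : ((n + 1 : Nat) : Int) = (n : Int) + 1 := by omega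
    rw [h0, PySem.List.pyRange_one_succ_right (by positivity), List.foldl_append, ih]
    simp only [List.foldl_cons, List.foldl_nil]
    have hsec : transform_secret (secAt s n) = secAt s (n + 1) :=
      (Function.iterate_succ_apply' transform_secret n s).symm
    have hdif : diffsL s n ++ [onesDigit (transform_secret (secAt s n)) - onesDigit (secAt s n)]
        = diffsL s (n + 1) := by
      simp [diffsL, List.range_succ, dAt, hsec]
    rw [hdif, hsec]
    refine Prod.ext rfl (Prod.ext rfl ?_)
    by_cases h3 : 3 ≤ n
    · have hslice : PySem.List.slice (diffsL s (n + 1)) (some (-4)) none = winW s n := by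
        rw [PySem.List.slice_from_neg_ofNat _ 4 (by omega)]
        have hlen : (diffsL s (n + 1)).length = n + 1 := by simp [diffsL]
        rw [hlen]
        have h4 : n + 1 - 4 = n - 3 := by omega
        rw [h4]
        simpa [diffsL, winW] using window_drop_full (dAt s) n h3
      have h3i : (3 : Int) ≤ (n : Int) := by exact_mod_cast h3
      simp only [hslice, dictL, h3, h3i, true_and]
    · have h3i : ¬ (3 : Int) ≤ (n : Int) := by exact_mod_cast h3
      simp only [dictL, h3, h3i, false_and, if_false]

lemma foldP_eq (s : Int) (n : Nat) :
    (PySem.List.pyRange 0 (n : Int) 1).foldl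
      (fun (st : Int × List Int) _ =>
        let sec' := transform_secret st.1
        (sec', st.2 ++ [onesDigit sec']))
      (s, [onesDigit s])
    = (secAt s n, pricesL s n) := by
  induction n with
  | zero =>
    simp [PySem.List.pyRange_one_eq_nil (le_refl (0 : Int)), secAt, pricesL]
  | succ n ih =>
    have h0 : ((n + 1 : Nat) : Int) = (n : Int) + 1 := by omega
    rw [h0, PySem.List.pyRange_one_succ_right (by positivity), List.foldl_append, ih]
    simp only [List.foldl_cons, List.foldl_nil]
    have hsec : transform_secret (secAt s n) = secAt s (n + 1) :=
      (Function.iterate_succ_apply' transform_secret n s).symm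
    refine Prod.ext hsec ?_
    simp [pricesL, List.range_succ, hsec]

lemma diffs_eq (s : Int) (n : Nat) :
    (PySem.List.pyRange 0 (((pricesL s n).length : Int) - 1) 1).map
      (fun i => PySem.List.pyGetD (pricesL s n) (i + 1) 0 - PySem.List.pyGetD (pricesL s n) i 0)
    = diffsL s n := by
  have hlen : ((pricesL s n).length : Int) - 1 = (n : Int) := by
    simp [pricesL]
  rw [hlen, PySem.List.pyRange_zero_natCast, List.map_map]
  apply List.ext_getElem
  · simp [diffsL]
  · intro i hi1 hi2
    simp only [List.getElem_map, List.getElem_range, Function.comp_apply]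
    have hc : ((i : Int) + 1) = ((i + 1 : Nat) : Int) := by omega
    rw [hc, PySem.List.pyGetD_natCast, PySem.List.pyGetD_natCast]
    have hiN : i < n := by simpa [diffsL] using hi2
    unfold pricesL
    rw [PySem.List.getD_map_range _ _ _ _ (by omega), PySem.List.getD_map_range _ _ _ _ (by omega)]
    simp [diffsL, dAt]

lemma foldD_eq (s : Int) (n m : Nat) (hm : m ≤ n) :
    (PySem.List.pyRange 3 (m : Int) 1).foldl
      (fun (sd : PySem.Dict (List Int) Int) i =>
        let window := PySem.List.slice (diffsL s n) (some (i - 3)) (some (i + 1))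
        if sd.contains window = false then sd.insert window (PySem.List.pyGetD (pricesL s n) (i + 1) 0) else sd)
      PySem.Dict.empty
    = dictL s m := by
  induction m with
  | zero =>
    simp [PySem.List.pyRange_one_eq_nil (by norm_num : (0 : Int) ≤ 3), dictL]
  | succ m ih =>
    have hmn : m ≤ n := by omega
    by_cases h3 : 3 ≤ m
    · have h3i : (3 : Int) ≤ (m : Int) := by exact_mod_cast h3
      rw [(by omega : ((m + 1 : Nat) : Int) = (m : Int) + 1), PySem.List.pyRange_one_succ_right h3i, List.foldl_append, ih hmn]
      simp only [List.foldl_cons, List.foldl_nil]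
      have hwin : PySem.List.slice (diffsL s n) (some ((m : Int) - 3)) (some ((m : Int) + 1))
          = winW s m := by
        have ha : ((m : Int) - 3) = ((m - 3 : Nat) : Int) := by omega
        have hb : ((m : Int) + 1) = ((m + 1 : Nat) : Int) := by omega
        rw [ha, hb, PySem.List.slice_natCast]
        have h4 : (m + 1) - (m - 3) = 4 := by omega
        rw [h4]
        simpa [diffsL, winW] using window_drop (dAt s) n m h3 (by omega)
      have hpr : PySem.List.pyGetD (pricesL s n) ((m : Int) + 1) 0 = onesDigit (secAt s (m + 1)) := by
        have hb : ((m : Int) + 1) = ((m + 1 : Nat) : Int) := by omega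
        rw [hb, PySem.List.pyGetD_natCast]
        unfold pricesL
        rw [PySem.List.getD_map_range _ _ _ _ (by omega)]
      simp only [hwin, hpr, dictL, h3, true_and]
    · have hnil : PySem.List.pyRange 3 ((m + 1 : Nat) : Int) 1 = [] := by
        apply PySem.List.pyRange_one_eq_nil
        push_cast; omega
      rw [hnil]
      have hnil' : PySem.List.pyRange 3 ((m : Nat) : Int) 1 = [] := by
        apply PySem.List.pyRange_one_eq_nil
        omega
      have := ih hmn
      rw [hnil'] at this
      simp only [List.foldl_nil] at this ⊢
      rw [this]
      simp only [dictL, h3, false_and, if_false]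

lemma portA_eq (s : Int) (num : Int) :
    find_secret_trade s num = (dictL s num.toNat).items := by
  unfold find_secret_trade
  by_cases h : 0 ≤ num
  · rw [show num = ((num.toNat : Nat) : Int) from (Int.toNat_of_nonneg h).symm, foldA_eq]
    rw [Int.toNat_natCast]
  · have h0 : num.toNat = 0 := Int.toNat_of_nonpos (by omega)
    rw [PySem.List.pyRange_one_eq_nil (by omega : num ≤ 0), h0]
    simp [dictL]

lemma portB_eq (s : Int) (num : Int) :
    find_secret_trade_alt s num = (dictL s num.toNat).items := by
  unfold find_secret_trade_alt
  by_cases h : 0 ≤ num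
  · rw [show num = ((num.toNat : Nat) : Int) from (Int.toNat_of_nonneg h).symm, foldP_eq]
    simp only [diffs_eq]
    have hlen : ((diffsL s num.toNat).length : Int) = (num.toNat : Int) := by simp [diffsL]
    rw [hlen, foldD_eq s num.toNat num.toNat (le_refl _)]
    rw [Int.toNat_natCast]
  · have h0 : num.toNat = 0 := Int.toNat_of_nonpos (by omega)
    rw [PySem.List.pyRange_one_eq_nil (by omega : num ≤ 0), h0]
    simp only [List.foldl_nil]
    have h1 : (([onesDigit s] : List Int).length : Int) - 1 = 0 := by simp
    rw [h1, PySem.List.pyRange_one_eq_nil (le_refl 0)]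
    simp [PySem.List.pyRange_one_eq_nil (by norm_num : (0:Int) ≤ 3), dictL]

-- ===== VERDICT (by name: the statement is the Claim_ definition above) =====
theorem find_secret_trade_spec : Claim_equal_find_secret_trade := by
  intro s num _
  unfold Spec_find_secret_trade
  rw [portA_eq, portB_eq]
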